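-- pv_equiv track=rewrite | github.com/SonNguyenHuynh/project_DACNTT2 | HewiUaprior.py | calculatorTubwp
-- ===== SOURCE A (Python) =====
-- def calculatorTubwp(tubp,tubw):
--     result =[]
--     for i in tubp:
--         for j in tubw:
--             if(list(i.keys())[0] == list(j.keys())[0]):
--                 tubpValue =  i.get(list(i.keys())[0])
--                 tubwValue = j.get(list(j.keys())[0])
--                 tubwpValue = tubpValue * tubwValue
--
--                 result.append({list(i.keys())[0]:tubwpValue})
--     return result
-- ===== SOURCE B (Python) =====
-- def calculatorTubwp(tubp, tubw):
--     # Index tubw by each dict's first key -> list of its values, then one pass over tubp.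
--     index = {}
--     for j in tubw:
--         k = next(iter(j))
--         index.setdefault(k, []).append(j[k])
--     result = []
--     for i in tubp:
--         k = next(iter(i))
--         v = i[k]
--         for w in index.get(k, []):
--             result.append({k: v * w})
--     return result
-- ===== Notes on version B (the rewrite author's own statement) =====
-- stated objective: faster
-- what changed: Replaces the nested scan of tubw for every element of tubp by a one-pass index of tubw keyed by first key, then a single pass over tubp reading the matching value lists.
-- outside the precondition, e.g. on calculatorTubwp([], [{}]): A returns [], B raises StopIteration; on calculatorTubwp([{}], []): A returns [], B raises StopIteration
import Mathlib
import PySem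

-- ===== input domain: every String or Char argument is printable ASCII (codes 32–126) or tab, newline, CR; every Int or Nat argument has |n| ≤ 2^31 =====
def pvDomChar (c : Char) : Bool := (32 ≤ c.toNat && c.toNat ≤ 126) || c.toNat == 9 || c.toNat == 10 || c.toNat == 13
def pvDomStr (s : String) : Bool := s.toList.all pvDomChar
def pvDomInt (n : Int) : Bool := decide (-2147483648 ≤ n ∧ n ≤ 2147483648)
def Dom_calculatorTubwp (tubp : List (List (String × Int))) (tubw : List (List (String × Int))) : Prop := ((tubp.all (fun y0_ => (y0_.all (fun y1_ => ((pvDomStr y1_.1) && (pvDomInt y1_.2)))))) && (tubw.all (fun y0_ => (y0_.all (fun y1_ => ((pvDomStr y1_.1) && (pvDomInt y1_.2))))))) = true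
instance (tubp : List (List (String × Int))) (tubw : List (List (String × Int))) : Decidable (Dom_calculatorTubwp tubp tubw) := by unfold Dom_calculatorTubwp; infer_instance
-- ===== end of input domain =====

-- B replaces A's nested quadratic scan by a one-pass first-key index of tubw plus a single pass over tubp.
-- ===== PORT A =====
-- A's nested loops: for i in tubp, for j in tubw, compare first keys; dicts are assoc lists read through PySem.Dict.ofList.
def calculatorTubwp (tubp : List (List (String × Int))) (tubw : List (List (String × Int))) : List (List (String × Int)) :=
  tubp.foldl (fun result i =>
    tubw.foldl (fun result j =>
      let di := PySem.Dict.ofList i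
      let dj := PySem.Dict.ofList j
      let ki := PySem.List.pyGetD di.keys 0 ""   -- list(i.keys())[0]; Pre_ keeps dicts nonempty (Python raises IndexError on {})
      let kj := PySem.List.pyGetD dj.keys 0 ""
      if ki == kj then
        result ++ [[(ki, di.getD ki 0 * dj.getD kj 0)]]
      else result) result) []

-- ===== PORT B =====
def pvBuildIndex (tubw : List (List (String × Int))) : PySem.Dict String (List Int) :=
  tubw.foldl (fun idx j =>
    let dj := PySem.Dict.ofList j
    let k := dj.keys.headD ""                    -- next(iter(j)); Pre_ keeps dicts nonempty
    idx.insert k (idx.getD k [] ++ [dj.getD k 0])) PySem.Dict.empty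

def calculatorTubwp_alt (tubp : List (List (String × Int))) (tubw : List (List (String × Int))) : List (List (String × Int)) :=
  let index := pvBuildIndex tubw
  tubp.foldl (fun result i =>
    let di := PySem.Dict.ofList i
    let k := di.keys.headD ""
    let v := di.getD k 0
    result ++ (index.getD k []).map (fun w => [(k, v * w)])) []

-- ===== PRECONDITION & SPEC =====
-- Pre_ excludes inputs containing an empty dict: there Python A raises IndexError whenever both lists are nonempty,
-- and on the remaining such corners (one list empty) A returns [] only because the loop never reaches the empty dict,
-- while B, which scans both lists unconditionally, raises StopIteration.
def Pre_calculatorTubwp (tubp : List (List (String × Int))) (tubw : List (List (String × Int))) : Prop :=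
  (∀ i ∈ tubp, i ≠ []) ∧ (∀ j ∈ tubw, j ≠ [])
instance (tubp : List (List (String × Int))) (tubw : List (List (String × Int))) : Decidable (Pre_calculatorTubwp tubp tubw) := by unfold Pre_calculatorTubwp; infer_instance
def pvWitness_calculatorTubwp : (List (List (String × Int))) × (List (List (String × Int))) :=
  ([[("a", 2)], [("b", 3)]], [[("a", 5)], [("a", 7)]])
def Spec_calculatorTubwp (tubp : List (List (String × Int))) (tubw : List (List (String × Int))) (out : List (List (String × Int))) : Prop := out = calculatorTubwp_alt tubp tubw
instance (tubp : List (List (String × Int))) (tubw : List (List (String × Int))) (out : List (List (String × Int))) : Decidable (Spec_calculatorTubwp tubp tubw out) := by unfold Spec_calculatorTubwp; infer_instance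

-- ===== CLAIM (what is proved, stated in full; the proofs are below) =====
def Claim_equal_calculatorTubwp : Prop := ∀ (tubp : List (List (String × Int))) (tubw : List (List (String × Int))), Dom_calculatorTubwp tubp tubw → Pre_calculatorTubwp tubp tubw → Spec_calculatorTubwp tubp tubw (calculatorTubwp tubp tubw)

-- ===== LEMMAS AND PROOFS =====

-- first key and its (Python-dict) value of an assoc-list dict
def pvFk (j : List (String × Int)) : String := (PySem.Dict.ofList j).keys.headD ""
def pvFv (j : List (String × Int)) : Int := (PySem.Dict.ofList j).getD (pvFk j) 0

-- the index's value list at k is exactly the first-key values of the tubw entries whose first key is k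
lemma pvIndex_getD (ws : List (List (String × Int))) (idx : PySem.Dict String (List Int)) (k : String) :
    (ws.foldl (fun idx j =>
      let dj := PySem.Dict.ofList j
      let kk := dj.keys.headD ""
      idx.insert kk (idx.getD kk [] ++ [dj.getD kk 0])) idx).getD k []
    = idx.getD k [] ++ (ws.filter (fun j => pvFk j == k)).map pvFv := by
  induction ws generalizing idx with
  | nil => simp
  | cons j ws ih =>
    simp only [List.foldl_cons, List.filter_cons]
    rw [ih]
    by_cases h : pvFk j = k
    · have hs : (PySem.Dict.ofList j).keys.head?.getD "" = k := by simpa [pvFk] using h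
      simp [pvFk, pvFv, hs]
    · have hne : ¬ k = (PySem.Dict.ofList j).keys.head?.getD "" := by
        simp [pvFk] at h; exact fun hk => h hk.symm
      have hb : ¬ (PySem.Dict.ofList j).keys.head?.getD "" = k := by
        simp [pvFk] at h; exact h
      simp [PySem.Dict.getD_insert, pvFk, hne, hb]

-- A's inner loop over tubw, with i's first key k and value v fixed, collects exactly the matching products
lemma pvInner (ws : List (List (String × Int))) (r : List (List (String × Int))) (k : String) (v : Int) :
    ws.foldl (fun result j =>
      let dj := PySem.Dict.ofList j
      let kj := PySem.List.pyGetD dj.keys 0 ""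
      if k == kj then result ++ [[(k, v * dj.getD kj 0)]] else result) r
    = r ++ ((ws.filter (fun j => pvFk j == k)).map pvFv).map (fun w => [(k, v * w)]) := by
  induction ws generalizing r with
  | nil => simp
  | cons j ws ih =>
    simp only [List.foldl_cons, List.filter_cons]
    have hpg : PySem.List.pyGetD (PySem.Dict.ofList j).keys 0 "" = pvFk j := by
      simp [PySem.List.pyGetD_zero, pvFk]
      cases (PySem.Dict.ofList j).keys <;> rfl
    by_cases h : pvFk j = k
    · have hb : (k == pvFk j) = true := by simp [h]
      have hb' : (pvFk j == k) = true := by simp [h]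
      simp only [hpg, hb, hb', if_true]
      rw [ih]
      simp [pvFv, h]
    · have hb : (k == pvFk j) = false := by simp; intro hk; exact h hk.symm
      have hb' : (pvFk j == k) = false := by simp [h]
      simp only [hpg, hb, hb', Bool.false_eq_true, if_false]
      exact ih r

-- ===== VERDICT (by name: the statement is the Claim_ definition above) =====
theorem calculatorTubwp_spec : Claim_equal_calculatorTubwp := by
  intro tubp tubw hd hp
  clear hd hp
  unfold Spec_calculatorTubwp calculatorTubwp calculatorTubwp_alt pvBuildIndex
  induction tubp using List.reverseRecOn with
  | nil => rfl
  | append_singleton tp i ih =>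
    simp only [List.foldl_append, List.foldl_cons, List.foldl_nil]
    rw [ih]
    rw [pvInner tubw _ (PySem.List.pyGetD (PySem.Dict.ofList i).keys 0 "") ((PySem.Dict.ofList i).getD (PySem.List.pyGetD (PySem.Dict.ofList i).keys 0 "") 0)]
    rw [pvIndex_getD tubw PySem.Dict.empty]
    have hpg : PySem.List.pyGetD (PySem.Dict.ofList i).keys 0 "" = pvFk i := by
      simp [PySem.List.pyGetD_zero, pvFk]
      cases (PySem.Dict.ofList i).keys <;> rfl
    simp [hpg, pvFk, List.map_map]
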